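-- pv_equiv track=rewrite | github.com/Goananda/Codecademy-project-Censor-Dispenser | censor_dispenser.py | censor_text
-- ===== SOURCE A (Python) =====
-- def censor_text(text, phrases, limit=0, del_near=0,
--                 letters="ABCDEFGHIJKLMNOPQRSTUVWXYZabcdefghijklmnopqrstuvwxyz-"):
--
--   # Words and word positions
--   words = []
--   word_positions = []
--   text += "."
--   letter_inds = [i for i in range(len(text)) if text[i] in letters]
--   noletter_inds = [i for i in range(len(text)) if not i in letter_inds]
--   point = -1
--   while [i for i in letter_inds if i > point]:
--     first_letter = [i for i in letter_inds if i > point][0]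
--     point = [i for i in noletter_inds if i > first_letter][0]
--     word_positions.append(first_letter)
--     words.append(text[first_letter:point].lower())
--
--   # Censor words
--   censor_words = set()
--   phrases_lists = [phrase.split() for phrase in phrases]
--   check = 0
--   for num_position in range(len(words)):
--     for phrase_list in phrases_lists:
--       if words[num_position:num_position+len(phrase_list)] == phrase_list:
--         if check >= limit:
--           censor_words.update(range(num_position-del_near, num_position+len(phrase_list)+del_near))
--         check += 1
--         break
--
--   # Censoring full text
--   for num_position in [i for i in censor_words if 0 <= i < len(words)]:
--     first_letter = word_positions[num_position]
--     length = len(words[num_position])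
--     text = text[:first_letter]+"X"*length+text[first_letter+length:]
--
--   return text[:-1]
-- ===== SOURCE B (Python) =====
-- def censor_text(text, phrases, limit=0, del_near=0,
--                 letters="ABCDEFGHIJKLMNOPQRSTUVWXYZabcdefghijklmnopqrstuvwxyz-"):
--
--   # One left-to-right pass over the text: collect (start, end, lowered word) tokens.
--   n = len(text)
--   tokens = []
--   i = 0
--   while i < n:
--     if text[i] in letters:
--       j = i + 1
--       while j < n and text[j] in letters:
--         j += 1
--       tokens.append((i, j, text[i:j].lower()))
--       i = j
--     else:
--       i += 1
--   words = [t[2] for t in tokens]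
--   w = len(words)
--
--   # Decide which word indices get censored (boolean mask instead of a set).
--   phrases_lists = [phrase.split() for phrase in phrases]
--   censored = [False] * w
--   check = 0
--   for k in range(w):
--     for phrase_list in phrases_lists:
--       if words[k:k+len(phrase_list)] == phrase_list:
--         if check >= limit:
--           for t in range(max(0, k-del_near), min(w, k+len(phrase_list)+del_near)):
--             censored[t] = True
--         check += 1
--         break
--
--   # One rebuild of the text from the mask.
--   out = list(text)
--   for (s, e, _), c in zip(tokens, censored):
--     if c:
--       for t in range(s, e):
--         out[t] = "X"
--   return "".join(out)
-- ===== Notes on version B (the rewrite author's own statement) =====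
-- stated objective: faster
-- what changed: Replaces A's quadratic index-list tokenizer (letter/non-letter index lists rebuilt by list comprehensions with O(n) list-membership tests on every step) and its repeated whole-string slice-splicing censor pass with a single left-to-right scan that emits (start,end,word) tokens, a boolean mask over word indices instead of an int set, and one in-place character-array rebuild of the output.
import Mathlib
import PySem

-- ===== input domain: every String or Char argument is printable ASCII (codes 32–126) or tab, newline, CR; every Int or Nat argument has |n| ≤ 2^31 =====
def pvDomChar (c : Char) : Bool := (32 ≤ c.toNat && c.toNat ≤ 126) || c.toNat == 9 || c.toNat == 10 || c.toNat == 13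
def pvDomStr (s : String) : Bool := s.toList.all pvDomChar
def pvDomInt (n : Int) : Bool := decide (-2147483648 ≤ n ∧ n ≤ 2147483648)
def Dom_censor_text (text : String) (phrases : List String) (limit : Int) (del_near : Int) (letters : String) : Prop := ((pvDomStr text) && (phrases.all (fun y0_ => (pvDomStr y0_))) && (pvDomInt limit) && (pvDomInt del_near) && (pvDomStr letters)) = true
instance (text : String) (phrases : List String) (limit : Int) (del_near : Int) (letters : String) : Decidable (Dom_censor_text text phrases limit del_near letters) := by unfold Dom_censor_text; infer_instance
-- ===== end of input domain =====

-- B replaces A's quadratic index-list tokenizer and repeated whole-string splicing by a single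
-- left-to-right scan, a boolean mask over word indices, and one rebuild of the character array
-- (objective: faster).


-- ===== PORT A =====
-- (termination lemma for the while loop: the set of letter indices beyond `point` shrinks)
theorem pvFilterGtLen (l : List Int) (point pt : Int) (fl : Int)
    (hmem : fl ∈ l.filter (fun i => decide (point < i))) (hlt : fl < pt) :
    (l.filter (fun i => decide (pt < i))).length < (l.filter (fun i => decide (point < i))).length := by
  have hpf : point < fl := by
    have := List.of_mem_filter hmem
    simpa using this
  have hsub : l.filter (fun i => decide (pt < i))
      = (l.filter (fun i => decide (point < i))).filter (fun i => decide (pt < i)) := by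
    rw [List.filter_filter]
    apply List.filter_congr
    intro x _
    by_cases h : pt < x
    · have : point < x := by omega
      simp [h, this]
    · simp [h]
  rw [hsub]
  rw [List.length_filter_lt_length_iff_exists]
  exact ⟨fl, hmem, by simp; omega⟩

-- Port of A's while loop (words / word_positions). Python raises IndexError when the inner
-- filtered list is empty; Pre_censor_text excludes exactly those inputs (the [] branch below).
def pvAtok (cs1 : List Char) (letterI noletterI : List Int) (point : Int)
    (words : List String) (wpos : List Int) : List String × List Int :=
  match hfl : letterI.filter (fun i => decide (point < i)) with
  | [] => (words, wpos)
  | fl :: _ =>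
    match h2 : noletterI.filter (fun i => decide (fl < i)) with
    | [] => (words, wpos)   -- unreachable under Pre_censor_text (Python: IndexError)
    | pt :: _ =>
      pvAtok cs1 letterI noletterI pt
        (words ++ [String.ofList (PySem.Chars.lower (PySem.List.slice cs1 (some fl) (some pt)))])
        (wpos ++ [fl])
termination_by (letterI.filter (fun i => decide (point < i))).length
decreasing_by
  exact pvFilterGtLen letterI point pt fl (hfl ▸ List.mem_cons_self)
    (by have := List.of_mem_filter (h2 ▸ List.mem_cons_self); simpa using this)

-- Port of A's inner `for phrase_list in phrases_lists: … break` loop (one position k).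
def pvAfor (words : List String) (limit del_near : Int) (k : Nat)
    (pls : List (List String)) (st : PySem.Set Int × Int) : PySem.Set Int × Int :=
  match pls with
  | [] => st
  | pl :: rest =>
    if PySem.List.slice words (some (k : Int)) (some ((k : Int) + (pl.length : Int))) = pl then
      (if limit ≤ st.2 then
        (PySem.Set.update st.1
          (PySem.List.pyRange ((k : Int) - del_near) ((k : Int) + (pl.length : Int) + del_near)),
         st.2 + 1)
       else (st.1, st.2 + 1))
    else pvAfor words limit del_near k rest st

-- Port note: Python strings are worked on as their character lists (PySem.Chars);
-- `text[i] in letters` for an in-range index i is membership of character text[i] in letters.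
def censor_text (text : String) (phrases : List String) (limit : Int) (del_near : Int) (letters : String) : String :=
  let cs1 : List Char := text.toList ++ ['.']                     -- text += "."
  let L : List Char := letters.toList
  let letter_inds : List Int :=
    (PySem.List.pyRange 0 (cs1.length : Int)).filter
      (fun i => (PySem.List.pyGet? cs1 i).elim false (fun c => L.contains c))
  let noletter_inds : List Int :=
    (PySem.List.pyRange 0 (cs1.length : Int)).filter (fun i => !letter_inds.contains i)
  let wp := pvAtok cs1 letter_inds noletter_inds (-1) [] []
  let words := wp.1
  let word_positions := wp.2
  let phrases_lists := phrases.map (fun phrase => PySem.Str.split₀ phrase)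
  let st := (List.range words.length).foldl
      (fun st k => pvAfor words limit del_near k phrases_lists st)
      ((PySem.Set.empty : PySem.Set Int), (0 : Int))
  let censor_words := st.1
  -- Python iterates the set in hash order; every step overwrites a fixed index range with 'X',
  -- so the final string does not depend on that order; the port iterates in insertion order.
  let members := censor_words.filter (fun i => decide (0 ≤ i) && decide (i < (words.length : Int)))
  let cs2 := members.foldl (fun t i =>
      let first_letter := PySem.List.pyGetD word_positions i 0
      let length := (PySem.List.pyGetD words i "").toList.length
      PySem.List.slice t none (some first_letter) ++ List.replicate length 'X'
        ++ PySem.List.slice t (some (first_letter + (length : Int))) none) cs1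
  String.ofList (PySem.List.slice cs2 none (some (-1)))           -- return text[:-1]

-- ===== PORT B =====
-- The scanner loops advance the index by at least one per step; they are written with an explicit
-- fuel argument (enough for the whole list) so that they are structural recursions.
def pvRunEndGo (cs L : List Char) : Nat → Nat → Nat
  | 0, j => j
  | f+1, j => if h : j < cs.length then (if L.contains cs[j] then pvRunEndGo cs L f (j+1) else j) else j

-- first index ≥ j that is not a letter (or the end of the list): `while j<n and text[j] in letters`
def pvRunEnd (cs L : List Char) (j : Nat) : Nat := pvRunEndGo cs L (cs.length - j) j

def pvScanGo (cs L : List Char) : Nat → Nat → List (Nat × Nat × String)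
  | 0, _ => []          -- fuel exhausted; not reached when fuel ≥ cs.length + 1 - i
  | f+1, i =>
    if h : i < cs.length then
      if L.contains cs[i] then
        let j := pvRunEnd cs L (i+1)
        (i, j, String.ofList (PySem.Chars.lower (PySem.List.slice cs (some (i : Int)) (some (j : Int)))))
          :: pvScanGo cs L f j
      else pvScanGo cs L f (i+1)
    else []

-- Single left-to-right pass: tokens (start, end, lowered word).
def pvScan (cs L : List Char) (i : Nat) : List (Nat × Nat × String) := pvScanGo cs L (cs.length + 1 - i) i

-- mark censored[t] = True for t in range(lo, hi)
def pvMark (arr : List Bool) (lo hi : Nat) : List Bool :=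
  (List.range' lo (hi - lo)).foldl (fun a t => a.set t true) arr

-- Port of B's inner `for phrase_list in phrases_lists: … break` loop (one position k).
def pvBstep (words : List String) (pls : List (List String)) (limit del_near : Int)
    (w k : Nat) (st : List Bool × Int) : List Bool × Int :=
  match pls with
  | [] => st
  | pl :: rest =>
    if PySem.List.slice words (some (k : Int)) (some ((k : Int) + (pl.length : Int))) = pl then
      (if limit ≤ st.2 then
        (pvMark st.1 (max 0 ((k : Int) - del_near)).toNat
          (min (w : Int) ((k : Int) + (pl.length : Int) + del_near)).toNat, st.2 + 1)
       else (st.1, st.2 + 1))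
    else pvBstep words rest limit del_near w k st

def censor_text_alt (text : String) (phrases : List String) (limit : Int) (del_near : Int) (letters : String) : String :=
  let cs : List Char := text.toList
  let L : List Char := letters.toList
  let toks := pvScan cs L 0
  let words := toks.map (fun t => t.2.2)
  let w := words.length
  let phrases_lists := phrases.map (fun phrase => PySem.Str.split₀ phrase)
  let st := (List.range w).foldl
      (fun st k => pvBstep words phrases_lists limit del_near w k st)
      (List.replicate w false, (0 : Int))
  let censored := st.1
  let out := (toks.zip censored).foldl (fun o tc =>
      if tc.2 then (List.range' tc.1.1 (tc.1.2.1 - tc.1.1)).foldl (fun o t => o.set t 'X') o else o) cs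
  String.ofList out

-- ===== PRECONDITION & SPEC =====
-- A appends a sentinel '.' and needs every letter run to end before a non-letter: whenever '.'
-- is itself in `letters` the appended sentinel extends the final run to the end of the text and
-- A raises IndexError, so exactly those inputs are excluded.
def Pre_censor_text (text : String) (phrases : List String) (limit : Int) (del_near : Int) (letters : String) : Prop :=
  letters.toList.contains '.' = false
instance (text : String) (phrases : List String) (limit : Int) (del_near : Int) (letters : String) : Decidable (Pre_censor_text text phrases limit del_near letters) := by unfold Pre_censor_text; infer_instance

def pvWitness_censor_text : String × List String × Int × Int × String :=
  ("hello there big world", ["big world", "hello"], 0, 0,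
   "ABCDEFGHIJKLMNOPQRSTUVWXYZabcdefghijklmnopqrstuvwxyz-")

def Spec_censor_text (text : String) (phrases : List String) (limit : Int) (del_near : Int) (letters : String) (out : String) : Prop := out = censor_text_alt text phrases limit del_near letters
instance (text : String) (phrases : List String) (limit : Int) (del_near : Int) (letters : String) (out : String) : Decidable (Spec_censor_text text phrases limit del_near letters out) := by unfold Spec_censor_text; infer_instance

-- ===== CLAIM (what is proved, stated in full; the proofs are below) =====
def Claim_equal_censor_text : Prop := ∀ (text : String) (phrases : List String) (limit : Int) (del_near : Int) (letters : String), Dom_censor_text text phrases limit del_near letters → Pre_censor_text text phrases limit del_near letters → Spec_censor_text text phrases limit del_near letters (censor_text text phrases limit del_near letters)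


-- ===== LEMMAS AND PROOFS =====

-- letter test used by both programs: is position t (within bounds) a letter of L?
def pvLetter (cs L : List Char) (t : Nat) : Bool :=
  (PySem.List.pyGet? cs (t : Int)).elim false (fun c => L.contains c)

theorem pvLetter_lt (cs L : List Char) (t : Nat) (h : t < cs.length) :
    pvLetter cs L t = L.contains cs[t] := by
  simp [pvLetter, PySem.List.pyGet?, PySem.List.pyIdx?, h]

theorem pvLetter_ge (cs L : List Char) (t : Nat) (h : cs.length ≤ t) :
    pvLetter cs L t = false := by
  simp only [pvLetter, PySem.List.pyGet?, PySem.List.pyIdx?]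
  split_ifs with h1 h2 h3 <;> first | (exfalso; omega) | simp

-- first index ≥ i (below n) satisfying p, else n
def pvSkip (p : Nat → Bool) (n i : Nat) : Nat :=
  if h : i < n then (if p i then i else pvSkip p n (i+1)) else n
termination_by n - i

theorem pvSkip_ge (p : Nat → Bool) (n i : Nat) (hi : i ≤ n) : i ≤ pvSkip p n i := by
  fun_induction pvSkip <;> omega

theorem pvSkip_le (p : Nat → Bool) (n i : Nat) : pvSkip p n i ≤ n := by
  fun_induction pvSkip <;> omega

theorem pvSkip_pred (p : Nat → Bool) (n i : Nat) (h : pvSkip p n i < n) :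
    p (pvSkip p n i) = true := by
  fun_induction pvSkip with
  | case1 i h hp => exact hp
  | case2 i h hp ih => exact ih ‹_›
  | case3 i h => omega

theorem pvSkip_min (p : Nat → Bool) (n i : Nat) :
    ∀ t, i ≤ t → t < pvSkip p n i → p t = false := by
  fun_induction pvSkip with
  | case1 i h hp => omega
  | case2 i h hp ih =>
      intro t ht1 ht2
      rcases Nat.eq_or_lt_of_le ht1 with rfl | h2
      · simpa using hp
      · exact ih t h2 ht2
  | case3 i h =>
      intro t ht1 ht2
      have := pvSkip_le p n i
      omega

theorem pvSkip_le_of (p : Nat → Bool) (n i t : Nat) (hit : i ≤ t) (htn : t < n)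
    (hp : p t = true) : pvSkip p n i ≤ t := by
  by_contra h
  rw [pvSkip_min p n i t hit (by omega)] at hp
  exact Bool.false_ne_true hp

theorem pvHead_filter_range' (p : Nat → Bool) (s m : Nat) :
    ((List.range' s m).filter p).head? =
      if pvSkip p (s+m) s < s+m then some (pvSkip p (s+m) s) else none := by
  induction m generalizing s with
  | zero => simp [pvSkip]
  | succ m ih =>
      rw [List.range'_succ]
      by_cases hp : p s
      · rw [List.filter_cons_of_pos hp]
        have hcond : s < s + (m+1) := by omega
        have hv : pvSkip p (s+(m+1)) s = s := by rw [pvSkip, dif_pos hcond, if_pos hp]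
        rw [hv, if_pos hcond]
        simp
      · have h1 : pvSkip p (s + (m+1)) s = pvSkip p ((s+1) + m) (s+1) := by
          rw [pvSkip, dif_pos (by omega : s < s + (m+1)), if_neg (by simp [hp]),
            show s + (m+1) = (s+1)+m from by omega]
        rw [List.filter_cons_of_neg (by simp [hp]), ih (s+1), h1,
          show s + (m+1) = (s+1)+m from by omega]

theorem pvRange_filter_ge (p : Nat → Bool) (n s : Nat) (hs : s ≤ n) :
    (List.range n).filter (fun t => p t && decide (s ≤ t)) = (List.range' s (n - s)).filter p := by
  have hr : List.range n = List.range' 0 s ++ List.range' s (n - s) := by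
    have hap := List.range'_append (s := 0) (m := s) (n := n - s) (step := 1)
    simp only [Nat.zero_add, Nat.one_mul] at hap
    rw [List.range_eq_range']
    conv_lhs => rw [show n = s + (n - s) from by omega]
    exact hap.symm
  rw [hr, List.filter_append]
  have h1 : (List.range' 0 s).filter (fun t => p t && decide (s ≤ t)) = [] := by
    rw [List.filter_eq_nil_iff]
    intro t ht
    have := List.mem_range'_1.mp ht
    simp
    intro _
    omega
  have h2 : (List.range' s (n - s)).filter (fun t => p t && decide (s ≤ t))
      = (List.range' s (n - s)).filter p := by
    apply List.filter_congr
    intro t ht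
    have := List.mem_range'_1.mp ht
    simp [Nat.le_of_lt_succ]
    intro _
    omega
  rw [h1, h2, List.nil_append]

theorem pvMapCastFilter (l : List Nat) (b : Int) :
    (l.map (fun (t : Nat) => (t : Int))).filter (fun i => decide (b < i))
      = (l.filter (fun (t : Nat) => decide (b < (t : Int)))).map (fun (t : Nat) => (t : Int)) := by
  induction l with
  | nil => simp
  | cons a l ih => by_cases h : b < (a : Int) <;> simp [h, ih]

theorem pvFilterI (p : Nat → Bool) (n s : Nat) (hs : s ≤ n) :
    ((((List.range n).filter p).map (fun (t : Nat) => (t : Int))).filter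
        (fun i => decide ((s : Int) - 1 < i))) =
      ((List.range' s (n - s)).filter p).map (fun (t : Nat) => (t : Int)) := by
  rw [pvMapCastFilter, List.filter_filter, ← pvRange_filter_ge p n s hs]
  congr 1
  apply List.filter_congr
  intro t _
  rw [decide_eq_decide.mpr (show ((s : Int) - 1 < (t : Int)) ↔ (s ≤ t) from by omega),
    Bool.and_comm]



-- ---- scanner facts ----

theorem pvRunEndGo_ge (cs L : List Char) : ∀ (f j : Nat), j ≤ pvRunEndGo cs L f j := by
  intro f
  induction f with
  | zero => intro j; simp [pvRunEndGo]
  | succ f ih =>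
      intro j
      rw [pvRunEndGo]
      split_ifs with h1 h2
      · exact le_trans (by omega) (ih (j+1))
      · omega
      · omega

theorem pvRunEnd_eq_skip (cs L : List Char) (j : Nat) (hj : j ≤ cs.length) :
    pvRunEnd cs L j = pvSkip (fun t => !pvLetter cs L t) cs.length j := by
  unfold pvRunEnd
  have aux : ∀ (f j : Nat), j ≤ cs.length → f = cs.length - j →
      pvRunEndGo cs L f j = pvSkip (fun t => !pvLetter cs L t) cs.length j := by
    intro f
    induction f with
    | zero =>
        intro j hj hf
        have : j = cs.length := by omega
        subst this
        rw [pvRunEndGo, pvSkip, dif_neg (by omega)]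
    | succ f ih =>
        intro j hj hf
        have hjl : j < cs.length := by omega
        rw [pvRunEndGo, dif_pos hjl, pvSkip, dif_pos hjl]
        simp only [pvLetter_lt cs L j hjl]
        by_cases hc : L.contains cs[j]
        · rw [if_pos hc, if_neg (by rw [hc]; decide), ih (j+1) (by omega) (by omega)]
        · rw [if_neg hc, if_pos (by rw [Bool.not_eq_true] at hc; rw [hc]; rfl)]
  exact aux _ j hj rfl

theorem pvRunEnd_le (cs L : List Char) (j : Nat) (hj : j ≤ cs.length) :
    pvRunEnd cs L j ≤ cs.length := by
  rw [pvRunEnd_eq_skip cs L j hj]; exact pvSkip_le _ _ _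

theorem pvScanGo_congr (cs L : List Char) :
    ∀ (f f' i : Nat), cs.length + 1 - i ≤ f → cs.length + 1 - i ≤ f' →
      pvScanGo cs L f i = pvScanGo cs L f' i := by
  intro f
  induction f with
  | zero =>
      intro f' i h1 h2
      have hi : ¬ i < cs.length := by omega
      cases f' with
      | zero => rfl
      | succ f' =>
          conv_rhs => rw [pvScanGo, dif_neg hi]
          rfl
  | succ f ih =>
      intro f' i h1 h2
      cases f' with
      | zero =>
          have hi : ¬ i < cs.length := by omega
          simp only [pvScanGo, dif_neg hi]
      | succ f' =>
          by_cases hi : i < cs.length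
          · by_cases hc : L.contains cs[i]
            · have hge := pvRunEndGo_ge cs L (cs.length - (i+1)) (i+1)
              simp only [pvScanGo, dif_pos hi, if_pos hc]
              rw [ih f' (pvRunEnd cs L (i+1)) (by unfold pvRunEnd; omega) (by unfold pvRunEnd; omega)]
            · simp only [pvScanGo, dif_pos hi, if_neg hc]
              rw [ih f' (i+1) (by omega) (by omega)]
          · simp only [pvScanGo, dif_neg hi]

theorem pvScan_eq (cs L : List Char) (i : Nat) :
    pvScan cs L i = if h : i < cs.length then
      (if L.contains cs[i] then
        (i, pvRunEnd cs L (i+1), String.ofList (PySem.Chars.lower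
            (PySem.List.slice cs (some (i : Int)) (some ((pvRunEnd cs L (i+1)) : Int)))))
          :: pvScan cs L (pvRunEnd cs L (i+1))
       else pvScan cs L (i+1))
    else [] := by
  unfold pvScan
  by_cases hi : i < cs.length
  · rw [show cs.length + 1 - i = (cs.length - i) + 1 from by omega]
    by_cases hc : L.contains cs[i]
    · have hge := pvRunEndGo_ge cs L (cs.length - (i+1)) (i+1)
      simp only [pvScanGo, dif_pos hi, if_pos hc]
      rw [pvScanGo_congr cs L (cs.length - i) (cs.length + 1 - pvRunEnd cs L (i+1))
        (pvRunEnd cs L (i+1)) (by unfold pvRunEnd; omega) (by omega)]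
    · simp only [pvScanGo, dif_pos hi, if_neg hc]
      rw [pvScanGo_congr cs L (cs.length - i) (cs.length + 1 - (i+1)) (i+1) (by omega) (by omega)]
  · rw [dif_neg hi]
    rcases Nat.lt_or_ge i (cs.length + 1) with h | h
    · rw [show cs.length + 1 - i = (cs.length - i) + 1 from by omega, pvScanGo, dif_neg hi]
    · rw [show cs.length + 1 - i = 0 from by omega, pvScanGo]

theorem pvScanGo_bounds (cs L : List Char) :
    ∀ (f i : Nat) (tok : Nat × Nat × String), tok ∈ pvScanGo cs L f i →
      i ≤ tok.1 ∧ tok.1 < tok.2.1 ∧ tok.2.1 ≤ cs.length ∧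
        (∀ t, tok.1 ≤ t → t < tok.2.1 → pvLetter cs L t = true) ∧
        tok.2.2.toList.length = tok.2.1 - tok.1 := by
  intro f
  induction f with
  | zero => intro i tok h; simp [pvScanGo] at h
  | succ f ih =>
      intro i tok h
      by_cases hi : i < cs.length
      · by_cases hc : L.contains cs[i]
        · simp only [pvScanGo, dif_pos hi, if_pos hc] at h
          set j := pvRunEnd cs L (i+1) with hj
          have hsk := pvRunEnd_eq_skip cs L (i+1) (by omega)
          have hij : i + 1 ≤ j := pvRunEndGo_ge cs L _ (i+1)
          have hjle : j ≤ cs.length := pvRunEnd_le cs L (i+1) (by omega)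
          rcases List.mem_cons.mp h with rfl | htl
          · refine ⟨le_refl _, show i < j by omega, show j ≤ cs.length from hjle, ?_, ?_⟩
            · intro t ht1 ht2
              replace ht1 : i ≤ t := ht1
              replace ht2 : t < j := ht2
              rcases Nat.eq_or_lt_of_le ht1 with rfl | hlt
              · rw [pvLetter_lt cs L _ hi]; exact hc
              · have := pvSkip_min (fun t => !pvLetter cs L t) cs.length (i+1) t (by omega)
                  (by rw [← hsk]; exact ht2)
                simpa using this
            · show (String.ofList (PySem.Chars.lower
                (PySem.List.slice cs (some (i : Int)) (some (j : Int))))).toList.length = j - i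
              have hlow : ∀ l : List Char, (PySem.Chars.lower l).length = l.length := by
                intro l; simp [PySem.Chars.lower]
              simp only [String.toList_ofList, PySem.List.slice_natCast, hlow,
                List.length_take, List.length_drop]
              omega
          · have := ih j tok htl
            exact ⟨by omega, this.2.1, this.2.2.1, this.2.2.2.1, this.2.2.2.2⟩
        · simp only [pvScanGo, dif_pos hi, if_neg hc] at h
          have := ih (i+1) tok h
          exact ⟨by omega, this.2.1, this.2.2.1, this.2.2.2.1, this.2.2.2.2⟩
      · simp only [pvScanGo, dif_neg hi] at h
        simp at h

theorem pvScan_bounds (cs L : List Char) (i : Nat) (tok : Nat × Nat × String)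
    (h : tok ∈ pvScan cs L i) :
    i ≤ tok.1 ∧ tok.1 < tok.2.1 ∧ tok.2.1 ≤ cs.length ∧
      (∀ t, tok.1 ≤ t → t < tok.2.1 → pvLetter cs L t = true) ∧
      tok.2.2.toList.length = tok.2.1 - tok.1 :=
  pvScanGo_bounds cs L _ i tok h

theorem pvScan_nil (cs L : List Char) (i : Nat)
    (h : ∀ t, i ≤ t → t < cs.length → pvLetter cs L t = false) : pvScan cs L i = [] := by
  unfold pvScan
  generalize cs.length + 1 - i = f
  induction f generalizing i with
  | zero => rfl
  | succ f ih =>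
      by_cases hi : i < cs.length
      · have hc : L.contains cs[i] = false := by
          rw [← pvLetter_lt cs L i hi]; exact h i (le_refl _) hi
        simp only [pvScanGo, dif_pos hi, if_neg (show ¬ L.contains cs[i] = true from by
          rw [hc]; decide)]
        exact ih (i+1) (fun t ht1 ht2 => h t (by omega) ht2)
      · simp only [pvScanGo, dif_neg hi]

theorem pvScan_skip (cs L : List Char) (i k : Nat) (hik : i ≤ k) (hk : k ≤ cs.length)
    (hnl : ∀ t, i ≤ t → t < k → pvLetter cs L t = false) :
    pvScan cs L i = pvScan cs L k := by
  have aux : ∀ (d i : Nat), i ≤ k → d = k - i →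
      (∀ t, i ≤ t → t < k → pvLetter cs L t = false) → pvScan cs L i = pvScan cs L k := by
    intro d
    induction d with
    | zero =>
        intro i h1 h2 _
        rw [show i = k from by omega]
    | succ d ih =>
        intro i h1 h2 hnl
        have hik2 : i < k := by omega
        rw [pvScan_eq, dif_pos (by omega)]
        have hc : L.contains cs[i] = false := by
          rw [← pvLetter_lt cs L i (by omega)]; exact hnl i (le_refl _) hik2
        rw [if_neg (show ¬ L.contains cs[i] = true from by rw [hc]; decide)]
        exact ih (i+1) (by omega) (by omega) (fun t ht1 ht2 => hnl t (by omega) ht2)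
  exact aux (k - i) i hik rfl hnl

-- ---- A's index lists in canonical form ----

def pvLetterI (cs L : List Char) : List Int :=
  ((List.range cs.length).filter (pvLetter cs L)).map (fun (t : Nat) => (t : Int))

def pvNoLetterI (cs L : List Char) : List Int :=
  ((List.range cs.length).filter (fun t => !pvLetter cs L t)).map (fun (t : Nat) => (t : Int))

theorem pvLetterI_eq (cs L : List Char) :
    (PySem.List.pyRange 0 (cs.length : Int)).filter
        (fun i => (PySem.List.pyGet? cs i).elim false (fun c => L.contains c))
      = pvLetterI cs L := by
  rw [PySem.List.pyRange_zero_natCast, List.filter_map]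
  rfl

theorem pvLetterI_contains (cs L : List Char) (t : Nat) :
    (pvLetterI cs L).contains ((t : Nat) : Int) = (decide (t < cs.length) && pvLetter cs L t) := by
  by_cases ht : t < cs.length
  · by_cases hp : pvLetter cs L t
    · simp [pvLetterI, ht, hp]
    · simp [pvLetterI, ht, hp]
  · have hfalse : pvLetter cs L t = false := pvLetter_ge cs L t (by omega)
    simp [pvLetterI, ht, hfalse]

theorem pvNoLetterI_eq (cs L : List Char) :
    (PySem.List.pyRange 0 (cs.length : Int)).filter (fun i => !(pvLetterI cs L).contains i)
      = pvNoLetterI cs L := by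
  rw [PySem.List.pyRange_zero_natCast, List.filter_map]
  unfold pvNoLetterI
  congr 1
  apply List.filter_congr
  intro t ht
  have htl : t < cs.length := List.mem_range.mp ht
  simp only [Function.comp_apply]
  rw [pvLetterI_contains, decide_eq_true htl, Bool.true_and]

-- ---- dropping the appended sentinel ----

theorem pvLetter_append (cs L : List Char) (c : Char) (hc : L.contains c = false) :
    pvLetter (cs ++ [c]) L = pvLetter cs L := by
  funext t
  rcases Nat.lt_trichotomy t cs.length with h | h | h
  · have hgl : (cs ++ [c])[t]'(by simp; omega) = cs[t]'h := List.getElem_append_left h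
    rw [pvLetter_lt _ L t (by simp; omega), pvLetter_lt cs L t h, hgl]
  · subst h
    rw [pvLetter_lt _ L cs.length (by simp), pvLetter_ge cs L cs.length (le_refl _),
      List.getElem_concat_length rfl _]
    exact hc
  · rw [pvLetter_ge _ L t (by simp; omega), pvLetter_ge cs L t (by omega)]

theorem pvSkip_succ_eq (q : Nat → Bool) (n j : Nat) (hq : q n = true) (hj : j ≤ n) :
    pvSkip q (n+1) j = pvSkip q n j := by
  set x := pvSkip q n j with hx
  have hxle : x ≤ n := pvSkip_le q n j
  have hxge : j ≤ x := pvSkip_ge q n j hj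
  apply le_antisymm
  · have hqx : q x = true := by
      rcases Nat.lt_or_ge x n with h | h
      · exact pvSkip_pred q n j h
      · have : x = n := by omega
        rw [this]; exact hq
    exact pvSkip_le_of q (n+1) j x hxge (by omega) hqx
  · set y := pvSkip q (n+1) j with hy
    have hyn : y ≤ n := pvSkip_le_of q (n+1) j n hj (by omega) hq
    rcases Nat.lt_or_ge y n with h | h
    · exact pvSkip_le_of q n j y (pvSkip_ge q (n+1) j (by omega)) h (pvSkip_pred q (n+1) j (by omega))
    · omega

theorem pvRunEnd_append (cs L : List Char) (c : Char) (hc : L.contains c = false)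
    (j : Nat) (hj : j ≤ cs.length) :
    pvRunEnd (cs ++ [c]) L j = pvRunEnd cs L j := by
  rw [pvRunEnd_eq_skip _ L j (by simp; omega), pvRunEnd_eq_skip cs L j hj,
    pvLetter_append cs L c hc, List.length_append, List.length_singleton]
  exact pvSkip_succ_eq _ cs.length j (by rw [pvLetter_ge cs L cs.length (le_refl _)]; rfl) hj

theorem pvScan_append (cs L : List Char) (c : Char) (hc : L.contains c = false) :
    ∀ (d i : Nat), d = cs.length + 1 - i → pvScan (cs ++ [c]) L i = pvScan cs L i := by
  intro d
  induction d using Nat.strong_induction_on with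
  | _ d ih =>
    intro i hd
    rcases Nat.lt_trichotomy i cs.length with hi | hi | hi
    · rw [pvScan_eq (cs ++ [c]), pvScan_eq cs, dif_pos hi, dif_pos (by simp; omega)]
      have hchar : (cs ++ [c])[i]'(by simp; omega) = cs[i] := List.getElem_append_left hi
      rw [hchar]
      by_cases hcc : L.contains cs[i]
      · rw [if_pos hcc, if_pos hcc]
        have hje : pvRunEnd (cs ++ [c]) L (i+1) = pvRunEnd cs L (i+1) :=
          pvRunEnd_append cs L c hc (i+1) (by omega)
        have hjle : pvRunEnd cs L (i+1) ≤ cs.length := pvRunEnd_le cs L (i+1) (by omega)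
        have hjge : i + 1 ≤ pvRunEnd cs L (i+1) := pvRunEndGo_ge cs L _ (i+1)
        rw [hje]
        congr 1
        · congr 2
          rw [PySem.List.slice_natCast, PySem.List.slice_natCast,
            List.drop_append_of_le_length (by omega), List.take_append_of_le_length (by simp; omega)]
        · exact ih (cs.length + 1 - pvRunEnd cs L (i+1)) (by omega) _ rfl
      · rw [if_neg hcc, if_neg hcc]
        exact ih (cs.length + 1 - (i+1)) (by omega) _ rfl
    · subst hi
      rw [pvScan_eq (cs ++ [c]), pvScan_eq cs, dif_pos (by simp), dif_neg (by omega)]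
      rw [show (cs ++ [c])[cs.length]'(by simp) = c from List.getElem_concat_length rfl _,
        if_neg (by rw [hc]; decide)]
      rw [pvScan_eq (cs ++ [c]), dif_neg (by simp)]
    · rw [pvScan_eq (cs ++ [c]), pvScan_eq cs, dif_neg (by simp; omega), dif_neg (by omega)]

-- ---- A's while loop produces exactly B's tokens ----

theorem pvAtok_eq_scan (cs L : List Char) (hne : 0 < cs.length)
    (hlast : pvLetter cs L (cs.length - 1) = false) :
    ∀ (d s : Nat), s ≤ cs.length → d = cs.length - s →
      ∀ (ws : List String) (ps : List Int),
      pvAtok cs (pvLetterI cs L) (pvNoLetterI cs L) ((s : Int) - 1) ws ps =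
        (ws ++ (pvScan cs L s).map (fun t => t.2.2),
         ps ++ (pvScan cs L s).map (fun t => ((t.1 : Nat) : Int))) := by
  intro d
  induction d using Nat.strong_induction_on with
  | _ d ih =>
    intro s hs hd ws ps
    have hsc : (pvLetterI cs L).filter (fun i => decide ((s : Int) - 1 < i))
        = ((List.range' s (cs.length - s)).filter (pvLetter cs L)).map (fun (t : Nat) => (t : Int)) :=
      pvFilterI (pvLetter cs L) cs.length s hs
    rw [pvAtok, hsc]
    split
    · -- no letter at or after s : both sides return the accumulators
      next heq =>
        have hfil : (List.range' s (cs.length - s)).filter (pvLetter cs L) = [] := by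
          simpa using heq
        have hnil : pvScan cs L s = [] := by
          apply pvScan_nil
          intro t ht1 ht2
          by_contra hp
          have hmem : t ∈ (List.range' s (cs.length - s)).filter (pvLetter cs L) := by
            rw [List.mem_filter]
            exact ⟨List.mem_range'_1.mpr ⟨ht1, by omega⟩, by simpa using hp⟩
          rw [hfil] at hmem
          simp at hmem
        rw [hnil]
        simp
    · next fl tail heq =>
        -- the head of the filtered list is the first letter position ≥ s
        obtain ⟨x, xs, hxl⟩ : ∃ x xs,
            (List.range' s (cs.length - s)).filter (pvLetter cs L) = x :: xs := by
          cases hfil : (List.range' s (cs.length - s)).filter (pvLetter cs L) with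
          | nil => rw [hfil] at heq; simp at heq
          | cons x xs => exact ⟨x, xs, rfl⟩
        have hhead := pvHead_filter_range' (pvLetter cs L) s (cs.length - s)
        rw [hxl, show s + (cs.length - s) = cs.length from by omega] at hhead
        have hskip_lt : pvSkip (pvLetter cs L) cs.length s < cs.length := by
          by_contra h
          rw [if_neg h] at hhead
          simp at hhead
        rw [if_pos hskip_lt] at hhead
        have hx : x = pvSkip (pvLetter cs L) cs.length s := by simpa using hhead
        have hfl_lt : x < cs.length := by rw [hx]; exact hskip_lt
        have hpfL : pvLetter cs L x = true := by rw [hx]; exact pvSkip_pred _ _ _ hskip_lt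
        have hfLge : s ≤ x := by rw [hx]; exact pvSkip_ge _ _ _ hs
        have hminL : ∀ t, s ≤ t → t < x → pvLetter cs L t = false := by
          intro t ht1 ht2
          rw [hx] at ht2
          exact pvSkip_min _ _ _ t ht1 ht2
        have hfl_eq : fl = ((x : Nat) : Int) := by
          rw [hxl, List.map_cons] at heq
          exact ((List.cons.injEq _ _ _ _).mp heq).1.symm
        subst hfl_eq
        have hfl_ne : x < cs.length - 1 := by
          rcases Nat.lt_or_ge x (cs.length - 1) with h | h
          · exact h
          · have hxe : x = cs.length - 1 := by omega
            rw [hxe, hlast] at hpfL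
            exact absurd hpfL (by simp)
        have hsc2 : (pvNoLetterI cs L).filter (fun i => decide (((x : Nat) : Int) < i))
            = ((List.range' (x+1) (cs.length - (x+1))).filter (fun t => !pvLetter cs L t)).map
                (fun (t : Nat) => (t : Int)) := by
          have heqf : (fun i : Int => decide (((x : Nat) : Int) < i))
              = (fun i : Int => decide (((x+1 : Nat) : Int) - 1 < i)) := by
            funext i
            rw [decide_eq_decide.mpr
              (show (((x : Nat) : Int) < i) ↔ (((x+1 : Nat) : Int) - 1 < i) from by push_cast; omega)]
          rw [heqf]
          exact pvFilterI _ cs.length (x+1) (by omega)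
        have hfNskip_le : pvSkip (fun t => !pvLetter cs L t) cs.length (x+1) ≤ cs.length - 1 :=
          pvSkip_le_of _ cs.length (x+1) (cs.length - 1) (by omega) (by omega)
            (by rw [hlast]; rfl)
        have hfNskip_lt : pvSkip (fun t => !pvLetter cs L t) cs.length (x+1) < cs.length := by
          omega
        have hhead2 := pvHead_filter_range' (fun t => !pvLetter cs L t) (x+1) (cs.length - (x+1))
        rw [show (x+1) + (cs.length - (x+1)) = cs.length from by omega, if_pos hfNskip_lt] at hhead2
        rw [hsc2]
        split
        · next heq2 =>
            have hfil2 : (List.range' (x+1) (cs.length - (x+1))).filter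
                (fun t => !pvLetter cs L t) = [] := by
              simpa using heq2
            rw [hfil2] at hhead2
            simp at hhead2
        · next pt tail2 heq2 =>
            obtain ⟨y, ys, hyl⟩ : ∃ y ys,
                (List.range' (x+1) (cs.length - (x+1))).filter (fun t => !pvLetter cs L t)
                  = y :: ys := by
              cases hfil : (List.range' (x+1) (cs.length - (x+1))).filter
                  (fun t => !pvLetter cs L t) with
              | nil => rw [hfil] at heq2; simp at heq2
              | cons y ys => exact ⟨y, ys, rfl⟩
            rw [hyl] at hhead2
            have hy : y = pvSkip (fun t => !pvLetter cs L t) cs.length (x+1) := by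
              simpa using hhead2
            have hfN_lt : y < cs.length := by rw [hy]; exact hfNskip_lt
            have hfN_ge : x + 1 ≤ y := by rw [hy]; exact pvSkip_ge _ _ _ (by omega)
            have hpfN : pvLetter cs L y = false := by
              have hh := pvSkip_pred (fun t => !pvLetter cs L t) cs.length (x+1) hfNskip_lt
              rw [← hy] at hh
              simpa using hh
            have hpt_eq : pt = ((y : Nat) : Int) := by
              rw [hyl, List.map_cons] at heq2
              exact ((List.cons.injEq _ _ _ _).mp heq2).1.symm
            subst hpt_eq
            -- apply the induction hypothesis at s' = y + 1
            have hrec := ih (cs.length - (y+1)) (by omega) (y+1) (by omega) rfl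
              (ws ++ [String.ofList (PySem.Chars.lower
                (PySem.List.slice cs (some ((x : Nat) : Int)) (some ((y : Nat) : Int))))])
              (ps ++ [((x : Nat) : Int)])
            rw [show ((y+1 : Nat) : Int) - 1 = ((y : Nat) : Int) from by push_cast; ring] at hrec
            rw [hrec]
            -- rewrite the scan side
            have hskip : pvScan cs L s = pvScan cs L x :=
              pvScan_skip cs L s x hfLge (by omega) hminL
            have hcfl : L.contains (cs[x]'hfl_lt) = true := by
              rw [← pvLetter_lt cs L x hfl_lt]; exact hpfL
            have hre : pvRunEnd cs L (x+1) = y := by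
              rw [pvRunEnd_eq_skip cs L (x+1) (by omega), ← hy]
            have hscanfL : pvScan cs L x
                = (x, y, String.ofList (PySem.Chars.lower
                    (PySem.List.slice cs (some ((x : Nat) : Int)) (some ((y : Nat) : Int)))))
                  :: pvScan cs L y := by
              rw [pvScan_eq, dif_pos hfl_lt, if_pos hcfl, hre]
            have hscanfN : pvScan cs L y = pvScan cs L (y+1) := by
              rw [pvScan_eq, dif_pos hfN_lt,
                if_neg (show ¬ L.contains (cs[y]'hfN_lt) = true from by
                  rw [← pvLetter_lt cs L y hfN_lt, hpfN]; decide)]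
            rw [hskip, hscanfL, hscanfN]
            simp

-- ---- marking a range in a list (shared by the mask and the output rebuild) ----

theorem pvSetRange_getElem? {α : Type} (v : α) :
    ∀ (m lo : Nat) (arr : List α),
      ((List.range' lo m).foldl (fun a t => a.set t v) arr).length = arr.length ∧
      ∀ u, ((List.range' lo m).foldl (fun a t => a.set t v) arr)[u]? =
        if lo ≤ u ∧ u < lo + m ∧ u < arr.length then some v else arr[u]? := by
  intro m
  induction m with
  | zero =>
      intro lo arr
      refine ⟨rfl, fun u => ?_⟩
      rw [if_neg (by omega)]
      rfl
  | succ m ih =>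
      intro lo arr
      rw [List.range'_succ, List.foldl_cons]
      obtain ⟨ihlen, ihget⟩ := ih (lo+1) (arr.set lo v)
      rw [List.length_set] at ihlen
      refine ⟨ihlen, fun u => ?_⟩
      rw [ihget u, List.length_set, List.getElem?_set]
      by_cases h1 : lo + 1 ≤ u ∧ u < lo + 1 + m ∧ u < arr.length
      · rw [if_pos h1, if_pos (by omega)]
      · rw [if_neg h1]
        by_cases h2 : lo = u
        · subst h2
          by_cases h3 : lo < arr.length
          · rw [if_pos rfl, if_pos h3, if_pos (by omega)]
          · rw [if_pos rfl, if_neg h3, if_neg (by omega),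
              List.getElem?_eq_none (by omega : arr.length ≤ lo)]
        · rw [if_neg h2, if_neg (by omega)]

-- ---- the two inner phrase loops keep equivalent censor state ----

theorem pvFor_step (words : List String) (limit del_near : Int) (k w : Nat)
    (hk : k < w) :
    ∀ (pls : List (List String)) (S : PySem.Set Int) (arr : List Bool) (c : Int),
      arr.length = w →
      (∀ t, t < w → (((t : Nat) : Int) ∈ S ↔ arr[t]? = some true)) →
      (pvAfor words limit del_near k pls (S, c)).2
          = (pvBstep words pls limit del_near w k (arr, c)).2 ∧
        (pvBstep words pls limit del_near w k (arr, c)).1.length = w ∧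
        ∀ t, t < w → (((t : Nat) : Int) ∈ (pvAfor words limit del_near k pls (S, c)).1 ↔
          (pvBstep words pls limit del_near w k (arr, c)).1[t]? = some true) := by
  intro pls
  induction pls with
  | nil => intro S arr c hlen hrel; exact ⟨rfl, hlen, hrel⟩
  | cons pl rest ih =>
      intro S arr c hlen hrel
      rw [pvAfor, pvBstep]
      by_cases hcond : PySem.List.slice words (some (k : Int))
          (some ((k : Int) + (pl.length : Int))) = pl
      · rw [if_pos hcond, if_pos hcond]
        by_cases hlim : limit ≤ c
        · rw [if_pos hlim, if_pos hlim]
          refine ⟨rfl, ?_, ?_⟩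
          · show (pvMark arr _ _).length = w
            unfold pvMark
            rw [(pvSetRange_getElem? true _ _ arr).1, hlen]
          · intro t ht
            show ((t : Nat) : Int) ∈ PySem.Set.update S _ ↔ _
            rw [PySem.Set.mem_update]
            unfold pvMark
            rw [(pvSetRange_getElem? true _ _ arr).2 t]
            rw [PySem.List.mem_pyRange_one]
            set lo := (max 0 ((k : Int) - del_near)).toNat with hlo
            set hi := (min (w : Int) ((k : Int) + (pl.length : Int) + del_near)).toNat with hhi
            have hloi : (lo : Int) = max 0 ((k : Int) - del_near) := by
              rw [hlo, Int.toNat_of_nonneg (by omega)]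
            by_cases hin : (k : Int) - del_near ≤ ((t : Nat) : Int) ∧
                ((t : Nat) : Int) < (k : Int) + (pl.length : Int) + del_near
            · rw [if_pos (by omega)]
              simp [hin]
            · rw [if_neg (by omega)]
              rw [hrel t ht]
              constructor
              · intro h; rcases h with h | h
                · exact h
                · exact absurd h hin
              · intro h; exact Or.inl h
        · rw [if_neg hlim, if_neg hlim]
          exact ⟨rfl, hlen, hrel⟩
      · rw [if_neg hcond, if_neg hcond]
        exact ih S arr c hlen hrel

theorem pvFor_fold (words : List String) (limit del_near : Int) (w : Nat) (pls : List (List String)) :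
    ∀ (ks : List Nat) (S : PySem.Set Int) (arr : List Bool) (c : Int),
      (∀ k ∈ ks, k < w) → arr.length = w →
      (∀ t, t < w → (((t : Nat) : Int) ∈ S ↔ arr[t]? = some true)) →
      (ks.foldl (fun st k => pvBstep words pls limit del_near w k st) (arr, c)).1.length = w ∧
      ∀ t, t < w →
        (((t : Nat) : Int) ∈ (ks.foldl (fun st k => pvAfor words limit del_near k pls st) (S, c)).1 ↔
          (ks.foldl (fun st k => pvBstep words pls limit del_near w k st) (arr, c)).1[t]? = some true) := by
  intro ks
  induction ks with
  | nil => intro S arr c _ hlen hrel; exact ⟨hlen, hrel⟩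
  | cons k ks ih =>
      intro S arr c hks hlen hrel
      rw [List.foldl_cons, List.foldl_cons]
      obtain ⟨h2, h3, h4⟩ := pvFor_step words limit del_near k w
        (hks k List.mem_cons_self) pls S arr c hlen hrel
      have hpair : pvAfor words limit del_near k pls (S, c)
          = ((pvAfor words limit del_near k pls (S, c)).1,
             (pvAfor words limit del_near k pls (S, c)).2) := rfl
      have hpair2 : pvBstep words pls limit del_near w k (arr, c)
          = ((pvBstep words pls limit del_near w k (arr, c)).1,
             (pvBstep words pls limit del_near w k (arr, c)).2) := rfl
      rw [hpair, hpair2, ← h2]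
      exact ih _ _ _ (fun k' hk' => hks k' (List.mem_cons_of_mem _ hk')) h3 h4

-- ---- A's slice-splice step written pointwise ----

theorem pvReplace_getElem? (t : List Char) (a len : Nat) (hb : a + len ≤ t.length) :
    (PySem.List.slice t none (some ((a : Nat) : Int)) ++ List.replicate len 'X'
        ++ PySem.List.slice t (some (((a : Nat) : Int) + ((len : Nat) : Int))) none).length
      = t.length ∧
    ∀ u, (PySem.List.slice t none (some ((a : Nat) : Int)) ++ List.replicate len 'X'
        ++ PySem.List.slice t (some (((a : Nat) : Int) + ((len : Nat) : Int))) none)[u]? =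
      if a ≤ u ∧ u < a + len then some 'X' else t[u]? := by
  rw [show ((a : Nat) : Int) + ((len : Nat) : Int) = ((a + len : Nat) : Int) from by push_cast; ring]
  rw [PySem.List.slice_to_natCast, PySem.List.slice_from_natCast]
  constructor
  · simp
    omega
  · intro u
    rcases Nat.lt_or_ge u a with h1 | h1
    · rw [List.getElem?_append_left (by simp; omega), List.getElem?_append_left (by simp; omega),
        List.getElem?_take, if_pos h1, if_neg (by omega)]
    · rcases Nat.lt_or_ge u (a + len) with h2 | h2
      · rw [List.getElem?_append_left (by simp; omega),
          List.getElem?_append_right (by simp; omega), if_pos (by omega)]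
        rw [List.getElem?_replicate, List.length_take, if_pos (by omega)]
      · rw [List.getElem?_append_right (by simp; omega), if_neg (by omega)]
        rw [List.length_append, List.length_take, List.length_replicate, List.getElem?_drop]
        congr 1
        omega

-- Bool test: does censor entry i cover text position u (A's fold step quantities)?
def pvCovA (positions : List Int) (words : List String) (i : Int) (u : Nat) : Bool :=
  decide (PySem.List.pyGetD positions i 0 ≤ ((u : Nat) : Int)) &&
    decide (((u : Nat) : Int) < PySem.List.pyGetD positions i 0
      + ((PySem.List.pyGetD words i "").toList.length : Int))

theorem pvFoldA (positions : List Int) (words : List String) (n1 : Nat) :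
    ∀ (ms : List Int),
      (∀ i ∈ ms, 0 ≤ PySem.List.pyGetD positions i 0 ∧
        (PySem.List.pyGetD positions i 0).toNat
          + (PySem.List.pyGetD words i "").toList.length ≤ n1) →
      ∀ (t : List Char), t.length = n1 →
      (ms.foldl (fun t i =>
          PySem.List.slice t none (some (PySem.List.pyGetD positions i 0))
            ++ List.replicate (PySem.List.pyGetD words i "").toList.length 'X'
            ++ PySem.List.slice t (some (PySem.List.pyGetD positions i 0
                + ((PySem.List.pyGetD words i "").toList.length : Int))) none) t).length = n1 ∧
      ∀ u, u < n1 →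
        (ms.foldl (fun t i =>
          PySem.List.slice t none (some (PySem.List.pyGetD positions i 0))
            ++ List.replicate (PySem.List.pyGetD words i "").toList.length 'X'
            ++ PySem.List.slice t (some (PySem.List.pyGetD positions i 0
                + ((PySem.List.pyGetD words i "").toList.length : Int))) none) t)[u]? =
          if ms.any (fun i => pvCovA positions words i u) then some 'X' else t[u]? := by
  intro ms
  induction ms with
  | nil =>
      intro _ t hn
      exact ⟨hn, fun u _ => by rw [List.any_nil, if_neg (by simp), List.foldl_nil]⟩
  | cons i ms ih =>
      intro hms t hn
      rw [List.foldl_cons]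
      have hi := hms i List.mem_cons_self
      set a := (PySem.List.pyGetD positions i 0).toNat with ha
      set len := (PySem.List.pyGetD words i "").toList.length with hlen
      have hcast : PySem.List.pyGetD positions i 0 = ((a : Nat) : Int) := by
        rw [ha, Int.toNat_of_nonneg hi.1]
      rw [hcast]
      obtain ⟨hrlen, hrget⟩ := pvReplace_getElem? t a len (by omega)
      obtain ⟨ihlen, ihget⟩ := ih (fun j hj => hms j (List.mem_cons_of_mem _ hj)) _
        (by rw [hrlen, hn])
      refine ⟨ihlen, fun u hu => ?_⟩
      rw [ihget u hu, List.any_cons]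
      by_cases hrest : ms.any (fun j => pvCovA positions words j u)
      · rw [hrest, Bool.or_true, if_pos rfl, if_pos rfl]
      · rw [Bool.not_eq_true] at hrest
        have hcov : pvCovA positions words i u = decide (a ≤ u ∧ u < a + len) := by
          unfold pvCovA
          rw [hcast, Bool.decide_and]
          congr 1
          · exact decide_eq_decide.mpr (by omega)
          · exact decide_eq_decide.mpr (by push_cast; omega)
        rw [hrest, Bool.or_false, if_neg (show ¬ false = true from by simp), hrget u, hcov]
        by_cases hc : a ≤ u ∧ u < a + len
        · rw [if_pos hc, decide_eq_true hc, if_pos rfl]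
        · rw [if_neg hc, decide_eq_false hc, if_neg (by simp)]

-- ---- B's masked rebuild written pointwise ----

theorem pvFoldB (n : Nat) :
    ∀ (l : List ((Nat × Nat × String) × Bool)),
      (∀ tc ∈ l, tc.1.2.1 ≤ n) →
      ∀ (t : List Char), t.length = n →
      (l.foldl (fun o tc =>
          if tc.2 then (List.range' tc.1.1 (tc.1.2.1 - tc.1.1)).foldl
            (fun o t => o.set t 'X') o else o) t).length = n ∧
      ∀ u, u < n →
        (l.foldl (fun o tc =>
          if tc.2 then (List.range' tc.1.1 (tc.1.2.1 - tc.1.1)).foldl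
            (fun o t => o.set t 'X') o else o) t)[u]? =
          if l.any (fun tc => tc.2 && decide (tc.1.1 ≤ u) && decide (u < tc.1.2.1))
          then some 'X' else t[u]? := by
  intro l
  induction l with
  | nil =>
      intro _ t hn
      exact ⟨hn, fun u _ => by rw [List.any_nil, if_neg (by simp), List.foldl_nil]⟩
  | cons tc l ih =>
      intro hl t hn
      rw [List.foldl_cons]
      have htc := hl tc List.mem_cons_self
      by_cases hc : tc.2 = true
      · rw [if_pos hc]
        obtain ⟨hrlen, hrget⟩ := pvSetRange_getElem? 'X' (tc.1.2.1 - tc.1.1) tc.1.1 t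
        obtain ⟨ihlen, ihget⟩ := ih (fun j hj => hl j (List.mem_cons_of_mem _ hj)) _
          (by rw [hrlen, hn])
        refine ⟨ihlen, fun u hu => ?_⟩
        rw [ihget u hu, List.any_cons]
        by_cases hrest : l.any (fun tc => tc.2 && decide (tc.1.1 ≤ u) && decide (u < tc.1.2.1))
        · rw [hrest, Bool.or_true, if_pos rfl, if_pos rfl]
        · rw [Bool.not_eq_true] at hrest
          rw [hrest, Bool.or_false, if_neg (show ¬ false = true from by simp), hrget u]
          by_cases hin : tc.1.1 ≤ u ∧ u < tc.1.2.1
          · rw [if_pos (show tc.1.1 ≤ u ∧ u < tc.1.1 + (tc.1.2.1 - tc.1.1) ∧ u < t.length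
                from by omega),
              hc, decide_eq_true hin.1, decide_eq_true hin.2, if_pos (by simp)]
          · rw [if_neg (show ¬ (tc.1.1 ≤ u ∧ u < tc.1.1 + (tc.1.2.1 - tc.1.1) ∧ u < t.length)
                from by omega)]
            have hff : (tc.2 && decide (tc.1.1 ≤ u) && decide (u < tc.1.2.1)) = false := by
              rcases Nat.lt_or_ge u tc.1.1 with h | h
              · rw [decide_eq_false (by omega : ¬ tc.1.1 ≤ u), Bool.and_false, Bool.false_and]
              · rw [decide_eq_false (by omega : ¬ u < tc.1.2.1), Bool.and_false]
            rw [hff, if_neg (by simp)]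
      · rw [if_neg hc]
        obtain ⟨ihlen, ihget⟩ := ih (fun j hj => hl j (List.mem_cons_of_mem _ hj)) t hn
        refine ⟨ihlen, fun u hu => ?_⟩
        rw [ihget u hu, List.any_cons]
        have hfalse : tc.2 = false := by rw [Bool.not_eq_true] at hc; exact hc
        rw [hfalse, Bool.false_and, Bool.false_and, Bool.false_or]

-- ---- assembly ----

theorem pvGetD_pos (toks : List (Nat × Nat × String)) (k : Nat) (hk : k < toks.length) :
    PySem.List.pyGetD (toks.map (fun t => ((t.1 : Nat) : Int))) ((k : Nat) : Int) 0
      = ((toks[k].1 : Nat) : Int) := by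
  rw [PySem.List.pyGetD_natCast, List.getD_eq_getElem?_getD,
    List.getElem?_eq_getElem (by simpa using hk), Option.getD_some, List.getElem_map]

theorem pvGetD_word (toks : List (Nat × Nat × String)) (k : Nat) (hk : k < toks.length) :
    PySem.List.pyGetD (toks.map (fun t => t.2.2)) ((k : Nat) : Int) ""
      = toks[k].2.2 := by
  rw [PySem.List.pyGetD_natCast, List.getD_eq_getElem?_getD,
    List.getElem?_eq_getElem (by simpa using hk), Option.getD_some, List.getElem_map]

-- ===== VERDICT (by name: the statement is the Claim_ definition above) =====
theorem censor_text_spec : Claim_equal_censor_text := by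
  intro text phrases limit del_near letters _ hpre
  unfold Spec_censor_text Pre_censor_text at *
  rw [censor_text, censor_text_alt]
  set cs : List Char := text.toList with hcs
  set L : List Char := letters.toList with hL
  set cs1 : List Char := cs ++ ['.'] with hcs1
  have hlen1 : cs1.length = cs.length + 1 := by simp [hcs1]
  have hlast : pvLetter cs1 L (cs1.length - 1) = false := by
    rw [hlen1, show cs.length + 1 - 1 = cs.length from by omega]
    rw [pvLetter_lt cs1 L cs.length (by omega),
      show cs1[cs.length]'(by omega) = '.' from List.getElem_concat_length rfl _]
    exact hpre
  -- tokeniser: A's while loop = B's scan (over cs1), and the sentinel can be dropped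
  rw [pvLetterI_eq cs1 L, pvNoLetterI_eq cs1 L]
  have htok := pvAtok_eq_scan cs1 L (by omega) hlast cs1.length 0 (by omega) (by omega) [] []
  rw [show (((0 : Nat) : Int) - 1) = (-1 : Int) from by norm_num] at htok
  simp only [List.nil_append] at htok
  rw [htok]
  rw [pvScan_append cs L '.' hpre (cs.length + 1) 0 (by omega)]
  set toks := pvScan cs L 0 with htoks
  set words : List String := toks.map (fun t => t.2.2) with hwords
  set positions : List Int := toks.map (fun t => ((t.1 : Nat) : Int)) with hpositions
  have hWw : words.length = toks.length := by rw [hwords]; exact List.length_map ..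
  have hbounds : ∀ tok ∈ toks, tok.1 < tok.2.1 ∧ tok.2.1 ≤ cs.length ∧
      tok.2.2.toList.length = tok.2.1 - tok.1 := by
    intro tok htokm
    have h := pvScan_bounds cs L 0 tok htokm
    exact ⟨h.2.1, h.2.2.1, h.2.2.2.2⟩
  set pls : List (List String) := phrases.map (fun phrase => PySem.Str.split₀ phrase) with hpls
  -- censor state: A's int set and B's boolean mask agree
  obtain ⟨hlenB, hrel⟩ := pvFor_fold words limit del_near words.length pls
    (List.range words.length) PySem.Set.empty (List.replicate words.length false) 0
    (fun k hk => List.mem_range.mp hk) (by simp)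
    (by
      intro t ht
      constructor
      · intro h; exact absurd h (List.not_mem_nil)
      · intro h; rw [List.getElem?_replicate, if_pos ht] at h; exact absurd h (by simp))
  set SA := ((List.range words.length).foldl
      (fun st k => pvAfor words limit del_near k pls st)
      ((PySem.Set.empty : PySem.Set Int), (0 : Int))).1 with hSA
  set SB := ((List.range words.length).foldl
      (fun st k => pvBstep words pls limit del_near words.length k st)
      (List.replicate words.length false, (0 : Int))).1 with hSB
  set ms := SA.filter (fun i => decide (0 ≤ i) && decide (i < (words.length : Int))) with hms
  -- the final rewrite passes
  have hms_spec : ∀ i ∈ ms, 0 ≤ PySem.List.pyGetD positions i 0 ∧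
      (PySem.List.pyGetD positions i 0).toNat
        + (PySem.List.pyGetD words i "").toList.length ≤ cs1.length := by
    intro i hi
    rw [hms, List.mem_filter] at hi
    have h0i : 0 ≤ i := by have := hi.2; simp at this; omega
    have hiw : i < (words.length : Int) := by have := hi.2; simp at this; omega
    have hk : i.toNat < toks.length := by omega
    rw [← Int.toNat_of_nonneg h0i, pvGetD_pos toks i.toNat hk, pvGetD_word toks i.toNat hk]
    have hb := hbounds (toks[i.toNat]) (List.getElem_mem hk)
    constructor
    · omega
    · rw [Int.toNat_natCast, hb.2.2]
      omega
  obtain ⟨hAlen, hAget⟩ := pvFoldA positions words cs1.length ms hms_spec cs1 rfl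
  obtain ⟨hBlen, hBget⟩ := pvFoldB cs.length (toks.zip SB)
    (fun tc htc => (hbounds tc.1 (List.of_mem_zip htc).1).2.1) cs rfl
  -- both strings agree pointwise
  rw [PySem.List.slice_to_neg_one]
  apply congrArg
  apply List.ext_getElem?
  intro u
  rw [List.getElem?_dropLast, hAlen, hlen1]
  by_cases hu : u < cs.length
  · rw [if_pos (by omega), hAget u (by omega), hBget u hu]
    have hcs1u : cs1[u]? = cs[u]? := List.getElem?_append_left hu
    rw [hcs1u]
    have hany : (ms.any (fun i => pvCovA positions words i u))
        = ((toks.zip SB).any (fun tc => tc.2 && decide (tc.1.1 ≤ u) && decide (u < tc.1.2.1))) := by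
      rw [Bool.eq_iff_iff, List.any_eq_true, List.any_eq_true]
      constructor
      · rintro ⟨i, hi_mem, hi_cov⟩
        rw [hms, List.mem_filter] at hi_mem
        have h0i : 0 ≤ i := by have := hi_mem.2; simp at this; omega
        have hiw : i < (words.length : Int) := by have := hi_mem.2; simp at this; omega
        have hk : i.toNat < toks.length := by omega
        have hSBk : SB[i.toNat]? = some true := by
          rw [← hrel i.toNat (by omega)]
          rw [Int.toNat_of_nonneg h0i]
          exact hi_mem.1
        have hkB : i.toNat < SB.length := by omega
        have hSBk' : SB[i.toNat] = true := by
          rw [List.getElem?_eq_getElem hkB] at hSBk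
          exact Option.some_injective _ hSBk
        refine ⟨(toks[i.toNat], SB[i.toNat]), ?_, ?_⟩
        · rw [List.mem_iff_getElem]
          exact ⟨i.toNat, by rw [List.length_zip]; omega, List.getElem_zip⟩
        · unfold pvCovA at hi_cov
          rw [← Int.toNat_of_nonneg h0i, pvGetD_pos toks i.toNat hk,
            pvGetD_word toks i.toNat hk] at hi_cov
          have hb := hbounds (toks[i.toNat]) (List.getElem_mem hk)
          rw [Bool.and_eq_true, decide_eq_true_iff, decide_eq_true_iff] at hi_cov
          have h1 : toks[i.toNat].1 ≤ u := by omega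
          have h2 : u < toks[i.toNat].2.1 := by
            rw [hb.2.2] at hi_cov
            omega
          rw [hSBk', decide_eq_true h1, decide_eq_true h2]
          rfl
      · rintro ⟨tc, htc_mem, htc_f⟩
        rw [List.mem_iff_getElem] at htc_mem
        obtain ⟨k, hkz, hktc⟩ := htc_mem
        rw [List.length_zip] at hkz
        have hk : k < toks.length := by omega
        have hkB : k < SB.length := by omega
        rw [List.getElem_zip] at hktc
        subst hktc
        rw [Bool.and_eq_true, Bool.and_eq_true, decide_eq_true_iff, decide_eq_true_iff] at htc_f
        have hf0 : SB[k] = true := htc_f.1.1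
        have hf1 : toks[k].1 ≤ u := htc_f.1.2
        have hf2 : u < toks[k].2.1 := htc_f.2
        have hSBk : SB[k]? = some true := by
          rw [List.getElem?_eq_getElem hkB]
          exact congrArg some hf0
        refine ⟨((k : Nat) : Int), ?_, ?_⟩
        · rw [hms, List.mem_filter]
          refine ⟨(hrel k (by omega)).mpr hSBk, ?_⟩
          simp
          omega
        · unfold pvCovA
          rw [pvGetD_pos toks k hk, pvGetD_word toks k hk]
          have hb := hbounds (toks[k]) (List.getElem_mem hk)
          rw [decide_eq_true (by omega : ((toks[k].1 : Nat) : Int) ≤ ((u : Nat) : Int)),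
            decide_eq_true (show ((u : Nat) : Int) < ((toks[k].1 : Nat) : Int)
              + ((toks[k].2.2.toList.length : Nat) : Int) from by rw [hb.2.2]; omega)]
          rfl
    rw [hany]
  · rw [if_neg (by omega)]
    symm
    apply List.getElem?_eq_none
    rw [hBlen]
    omega
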